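-- pv_equiv track=rewrite | github.com/bnpi-retail/retail | addons/ozon/helpers.py | split_keywords
-- ===== SOURCE A (Python) =====
-- def split_keywords(keywords_string: str) -> list:
--     words = []
--     l = keywords_string.split(";")
--     for w in l:
--         if w == "" or w == " ":
--             continue
--
--         if "," in w:
--             for i in w.split(","):
--                 if i == "" or i == " ":
--                     continue
--                 else:
--                     words.append(i)
--         else:
--             words.append(w)
--     words = [word.strip() for word in words]
--     return words
-- ===== SOURCE B (Python) =====
-- def split_keywords(keywords_string: str) -> list:
--     tokens = keywords_string.replace(",", ";").split(";")
--     return [t.strip() for t in tokens if t != "" and t != " "]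
-- ===== Notes on version B (the rewrite author's own statement) =====
-- stated objective: simpler
-- what changed: Normalizes commas to semicolons and does one split / filter / strip pass, removing the nested per-segment comma split and its contains-comma branch.
import Mathlib
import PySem

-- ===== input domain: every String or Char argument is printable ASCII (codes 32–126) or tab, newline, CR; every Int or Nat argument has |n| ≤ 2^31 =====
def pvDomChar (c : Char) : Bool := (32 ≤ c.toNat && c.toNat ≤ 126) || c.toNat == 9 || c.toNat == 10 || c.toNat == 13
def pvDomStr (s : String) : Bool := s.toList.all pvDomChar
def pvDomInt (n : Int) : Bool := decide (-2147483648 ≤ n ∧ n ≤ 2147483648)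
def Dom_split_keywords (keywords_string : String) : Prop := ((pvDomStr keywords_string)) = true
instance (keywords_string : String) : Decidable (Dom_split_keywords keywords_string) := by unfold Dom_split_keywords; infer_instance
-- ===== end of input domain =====

-- B replaces the nested split-on-';'-then-split-on-',' loop by normalizing ',' to ';' and doing
-- one split / filter / strip pass (simpler decomposition, same behaviour; return value only).

-- ===== PORT A =====
def split_keywords (keywords_string : String) : List String :=
  let l := (PySem.Str.split? keywords_string ";").getD []
  let words := l.foldl (fun words w =>
    if w == "" || w == " " then words
    else if PySem.Str.isIn "," w then
      ((PySem.Str.split? w ",").getD []).foldl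
        (fun words i => if i == "" || i == " " then words else words ++ [i]) words
    else words ++ [w]) ([] : List String)
  words.map PySem.Str.strip

-- ===== PORT B =====
def split_keywords_alt (keywords_string : String) : List String :=
  let tokens := (PySem.Str.split? (PySem.Str.replace keywords_string "," ";") ";").getD []
  (tokens.filter (fun t => t != "" && t != " ")).map PySem.Str.strip

-- ===== PRECONDITION & SPEC =====
def Spec_split_keywords (keywords_string : String) (out : List String) : Prop := out = split_keywords_alt keywords_string
instance (keywords_string : String) (out : List String) : Decidable (Spec_split_keywords keywords_string out) := by unfold Spec_split_keywords; infer_instance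

-- ===== CLAIM (what is proved, stated in full; the proofs are below) =====
def Claim_equal_split_keywords : Prop := ∀ (keywords_string : String), Dom_split_keywords keywords_string → Spec_split_keywords keywords_string (split_keywords keywords_string)

-- ===== LEMMAS AND PROOFS =====

/-- prepend `ys` onto the first piece (or make it the only piece) -/
def pvConsFst (ys : List Char) : List (List Char) → List (List Char)
  | [] => [ys]
  | p :: ps => (ys ++ p) :: ps

/-- simple structural split on a single delimiter character -/
def pvSplit1 (c : Char) : List Char → List (List Char)
  | [] => [[]]
  | x :: xs => if x = c then [] :: pvSplit1 c xs else pvConsFst [x] (pvSplit1 c xs)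

theorem pvSplit1_ne_nil (c : Char) (s : List Char) : pvSplit1 c s ≠ [] := by
  cases s with
  | nil => simp [pvSplit1]
  | cons x xs =>
    simp only [pvSplit1]
    split
    · simp
    · cases h : pvSplit1 c xs <;> simp [pvConsFst]

theorem pvConsFst_nil (L : List (List Char)) (h : L ≠ []) : pvConsFst [] L = L := by
  cases L with
  | nil => exact absurd rfl h
  | cons p ps => simp [pvConsFst]

theorem pvConsFst_consFst (ys zs : List Char) (L : List (List Char)) :
    pvConsFst ys (pvConsFst zs L) = pvConsFst (ys ++ zs) L := by
  cases L <;> simp [pvConsFst]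

theorem pv_splitOn_go_eq (c : Char) :
    ∀ (fuel : Nat) (l cur : List Char) (acc : List (List Char)), l.length < fuel →
      PySem.Chars.splitOn.go [c] fuel l cur acc =
        acc.reverse ++ pvConsFst cur.reverse (pvSplit1 c l) := by
  intro fuel
  induction fuel with
  | zero => intro l cur acc h; omega
  | succ n ih =>
    intro l cur acc h
    cases l with
    | nil =>
      simp [PySem.Chars.splitOn.go, pvSplit1, pvConsFst]
    | cons x rest =>
      by_cases hx : x = c
      · subst hx
        have hpref : List.isPrefixOf [x] (x :: rest) = true := by
          simp [List.isPrefixOf]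
        rw [PySem.Chars.splitOn.go]
        simp only [hpref, if_pos]
        have : List.drop (List.length [x]) (x :: rest) = rest := by simp
        rw [this, ih rest [] (cur.reverse :: acc) (by simpa using Nat.lt_of_succ_lt_succ h)]
        simp only [List.reverse_nil]
        rw [pvConsFst_nil _ (pvSplit1_ne_nil x rest)]
        simp [pvSplit1, pvConsFst]
      · have hpref : List.isPrefixOf [c] (x :: rest) = false := by
          simp [List.isPrefixOf]
          intro hc; exact absurd hc.symm hx
        rw [PySem.Chars.splitOn.go]
        simp only [hpref]
        rw [if_neg (by simp)]
        rw [ih rest (x :: cur) acc (by simpa using Nat.lt_of_succ_lt_succ h)]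
        simp only [pvSplit1, if_neg hx]
        rw [pvConsFst_consFst]
        simp

theorem pv_splitOn_singleton (c : Char) (s : List Char) :
    PySem.Chars.splitOn s [c] = pvSplit1 c s := by
  unfold PySem.Chars.splitOn
  rw [pv_splitOn_go_eq c (s.length + 1) s [] [] (by omega)]
  simp [pvConsFst_nil _ (pvSplit1_ne_nil c s)]

/-- the normalization `','` → `';'` on characters -/
def pvNorm (x : Char) : Char := if x = ',' then ';' else x

theorem pv_replace_go_eq :
    ∀ (fuel : Nat) (l acc : List Char), l.length ≤ fuel →
      PySem.Chars.replace.go [','] [';'] fuel l acc = acc.reverse ++ l.map pvNorm := by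
  intro fuel
  induction fuel with
  | zero =>
    intro l acc h
    have : l = [] := List.length_eq_zero_iff.mp (Nat.le_zero.mp h)
    subst this
    simp [PySem.Chars.replace.go]
  | succ n ih =>
    intro l acc h
    cases l with
    | nil => simp [PySem.Chars.replace.go]
    | cons x rest =>
      by_cases hx : x = ','
      · subst hx
        have hpref : List.isPrefixOf [','] (',' :: rest) = true := by simp [List.isPrefixOf]
        rw [PySem.Chars.replace.go]
        simp only [hpref, if_pos]
        have : List.drop (List.length [',']) (',' :: rest) = rest := by simp
        rw [this, ih rest _ (by simpa using Nat.le_of_succ_le_succ h)]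
        simp [pvNorm]
      · have hpref : List.isPrefixOf [','] (x :: rest) = false := by
          simp [List.isPrefixOf]
          intro hc; exact absurd hc.symm hx
        rw [PySem.Chars.replace.go]
        simp only [hpref]
        rw [if_neg (by simp)]
        rw [ih rest _ (by simpa using Nat.le_of_succ_le_succ h)]
        simp [pvNorm, hx]

theorem pv_replace_eq (s : List Char) :
    PySem.Chars.replace s [','] [';'] = s.map pvNorm := by
  unfold PySem.Chars.replace
  rw [if_neg (by simp)]
  rw [pv_replace_go_eq s.length s [] (le_refl _)]
  simp

/-- splitting on ';' after normalizing ',' to ';' = splitting on ';' then on ',' -/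
theorem pv_split_norm (s : List Char) :
    pvSplit1 ';' (s.map pvNorm) = (pvSplit1 ';' s).flatMap (pvSplit1 ',') := by
  induction s with
  | nil => simp [pvSplit1]
  | cons x xs ih =>
    by_cases hsemi : x = ';'
    · subst hsemi
      have h1 : pvNorm ';' = ';' := by decide
      simp only [List.map_cons, h1]
      simp only [pvSplit1, ih]
      simp only [if_true, List.flatMap_cons]
      rw [show pvSplit1 ',' ([] : List Char) = [[]] from rfl]
      rfl
    · by_cases hcomma : x = ','
      · subst hcomma
        have h1 : pvNorm ',' = ';' := by decide
        have hne : (',' : Char) ≠ ';' := by decide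
        obtain ⟨p, ps, hp⟩ := List.exists_cons_of_ne_nil (pvSplit1_ne_nil ';' xs)
        simp only [List.map_cons, h1, pvSplit1, if_neg hne, ih, hp, pvConsFst,
          List.flatMap_cons, List.singleton_append, if_true]
        rfl
      · obtain ⟨p, ps, hp⟩ := List.exists_cons_of_ne_nil (pvSplit1_ne_nil ';' xs)
        have hn : pvNorm x = x := by simp [pvNorm, hcomma]
        simp only [List.map_cons, hn]
        simp only [pvSplit1, if_neg hsemi, ih, hp, pvConsFst, List.flatMap_cons]
        obtain ⟨q, qs, hq⟩ := List.exists_cons_of_ne_nil (pvSplit1_ne_nil ',' p)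
        rw [hq, List.singleton_append,
            show pvSplit1 ',' (x :: p) = pvConsFst [x] (pvSplit1 ',' p) from by
              simp [pvSplit1, hcomma],
            hq]
        rfl

theorem pv_no_comma (w : List Char) (h : ',' ∉ w) : pvSplit1 ',' w = [w] := by
  induction w with
  | nil => simp [pvSplit1]
  | cons x xs ih =>
    simp only [List.mem_cons, not_or] at h
    have hx : ¬ x = ',' := fun hc => h.1 hc.symm
    simp only [pvSplit1, if_neg hx]
    rw [ih h.2]
    simp [pvConsFst]

/-- the keep test of both programs -/
def pvKeep (t : String) : Bool := t != "" && t != " "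

theorem pv_foldl_skip (l : List String) (init : List String) :
    l.foldl (fun ws i => if i == "" || i == " " then ws else ws ++ [i]) init
      = init ++ l.filter pvKeep := by
  induction l generalizing init with
  | nil => simp
  | cons x xs ih =>
    by_cases hx : (x == "" || x == " ") = true
    · simp only [List.foldl_cons, if_pos hx, ih, List.filter_cons]
      have : pvKeep x = false := by
        simp only [Bool.or_eq_true, beq_iff_eq] at hx
        rcases hx with h | h <;> subst h <;> decide
      simp [this]
    · simp only [List.foldl_cons, if_neg hx, ih, List.filter_cons]
      have : pvKeep x = true := by
        simp only [Bool.or_eq_true, beq_iff_eq, not_or] at hx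
        simp [pvKeep, bne_iff_ne, hx.1, hx.2]
      simp [this]

theorem pv_split?_getD (s : String) (c : Char) (h : String.toList (String.ofList [c]) = [c]) :
    (PySem.Str.split? s (String.ofList [c])).getD [] = (pvSplit1 c s.toList).map String.ofList := by
  unfold PySem.Str.split? PySem.Chars.split?
  rw [h]
  rw [if_neg (by simp)]
  simp [pv_splitOn_singleton]

/-- contribution of one ';'-segment of A's outer loop -/
theorem pv_step_eq (ws : List String) (w : String) :
    (if w == "" || w == " " then ws
     else if PySem.Str.isIn "," w then
       ((PySem.Str.split? w ",").getD []).foldl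
         (fun words i => if i == "" || i == " " then words else words ++ [i]) ws
     else ws ++ [w])
    = ws ++ ((pvSplit1 ',' w.toList).map String.ofList).filter pvKeep := by
  by_cases h0 : (w == "" || w == " ") = true
  · rw [if_pos h0]
    simp only [Bool.or_eq_true, beq_iff_eq] at h0
    rcases h0 with rfl | rfl
    · have : ("" : String).toList = [] := by decide
      rw [this, pv_no_comma [] (by simp)]
      simp [pvKeep]
    · have : (" " : String).toList = [' '] := by decide
      rw [this, pv_no_comma [' '] (by decide)]
      have : String.ofList [' '] = " " := by decide
      simp [this, pvKeep]
  · rw [if_neg h0]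
    by_cases hc : PySem.Str.isIn "," w = true
    · rw [if_pos hc]
      rw [show ("," : String) = String.ofList [','] from rfl,
          pv_split?_getD w ',' (by decide)]
      exact pv_foldl_skip _ ws
    · rw [if_neg hc]
      have hmem : ',' ∉ w.toList := by
        rw [PySem.Str.isIn_eq] at hc
        have := (PySem.Chars.isIn_eq_false_iff (",".toList) w.toList).mp
          (Bool.not_eq_true _ ▸ (by simpa using hc))
        intro hm
        apply this
        obtain ⟨pre, suf, hps⟩ := List.append_of_mem hm
        refine ⟨pre, suf, ?_⟩
        rw [show (",".toList) = [','] from by decide]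
        simpa using hps.symm
      rw [pv_no_comma _ hmem]
      have hk : pvKeep w = true := by
        simp only [Bool.or_eq_true, not_or, Bool.not_eq_true] at h0
        simp [pvKeep, bne, h0.1, h0.2]
      simp [String.ofList_toList, hk]

theorem pv_foldl_flat (l : List String) (init : List String) :
    l.foldl (fun ws w =>
      if w == "" || w == " " then ws
      else if PySem.Str.isIn "," w then
        ((PySem.Str.split? w ",").getD []).foldl
          (fun words i => if i == "" || i == " " then words else words ++ [i]) ws
      else ws ++ [w]) init
    = init ++ l.flatMap (fun w => ((pvSplit1 ',' w.toList).map String.ofList).filter pvKeep) := by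
  induction l generalizing init with
  | nil => simp
  | cons x xs ih =>
    rw [List.foldl_cons, pv_step_eq, ih]
    simp

-- ===== VERDICT (by name: the statement is the Claim_ definition above) =====
theorem split_keywords_spec : Claim_equal_split_keywords := by
  intro s _
  unfold Spec_split_keywords
  simp only [split_keywords, split_keywords_alt]
  rw [show (";" : String) = String.ofList [';'] from rfl]
  rw [pv_split?_getD s ';' (by decide),
      pv_split?_getD (PySem.Str.replace s "," (String.ofList [';'])) ';' (by decide)]
  have hrep : (PySem.Str.replace s "," (String.ofList [';'])).toList = s.toList.map pvNorm := by
    rw [PySem.Str.toList_replace]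
    rw [show (",".toList) = [','] from by decide, show ((String.ofList [';']).toList) = [';'] from by decide]
    exact pv_replace_eq s.toList
  rw [hrep, pv_split_norm, pv_foldl_flat]
  rw [show (fun t => t != "" && t != " ") = pvKeep from rfl]
  simp [List.flatMap_map, List.map_flatMap, List.filter_flatMap, String.toList_ofList]
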